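-- pv_equiv track=rewrite | github.com/nastushan/open-cravat-modules-karchinlab | annotators/hgvs/hgvs.py | _count_seq_tail_repeats
-- ===== SOURCE A (Python) =====
-- def _count_seq_tail_repeats(seq, unit):
--     n = 0
--     if len(unit) > 0:
--         try:
--             while (seq[len(seq)-len(unit)*(n+1):
--                        len(seq)-len(unit)*(n)]
--                    == unit):
--                 n += 1
--         except IndexError:
--             pass
--     return n
-- ===== SOURCE B (Python) =====
-- def _count_seq_tail_repeats(seq, unit):
--     u = len(unit)
--     if u == 0:
--         return 0
--     m = 0
--     n = len(seq)
--     while m < n and seq[n - 1 - m] == unit[u - 1 - m % u]: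
--         m += 1
--     return m // u
-- ===== Notes on version B (the rewrite author's own statement) =====
-- stated objective: alternative
-- what changed: Instead of peeling one whole unit per iteration with repeated slice comparisons, B does a single character-by-character backward scan of seq against unit read cyclically from its end, then divides the matched length by len(unit).
import Mathlib
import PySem

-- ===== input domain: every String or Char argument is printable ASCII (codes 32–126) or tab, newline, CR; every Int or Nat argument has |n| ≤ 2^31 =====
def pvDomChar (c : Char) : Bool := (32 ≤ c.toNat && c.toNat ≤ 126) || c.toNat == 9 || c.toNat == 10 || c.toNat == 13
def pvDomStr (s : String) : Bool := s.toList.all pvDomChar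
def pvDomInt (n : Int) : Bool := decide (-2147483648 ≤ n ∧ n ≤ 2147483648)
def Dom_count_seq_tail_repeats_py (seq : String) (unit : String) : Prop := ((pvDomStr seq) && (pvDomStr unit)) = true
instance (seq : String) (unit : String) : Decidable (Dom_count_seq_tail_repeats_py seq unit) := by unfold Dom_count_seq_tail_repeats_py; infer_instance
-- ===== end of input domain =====

-- B replaces A's per-unit slice peeling by a single character-by-character backward scan
-- (matching seq from the end against unit read cyclically backwards) followed by one
-- integer division; objective: alternative algorithm, same exact return value; both total.

-- ===== PORT A =====
-- A's while loop, incrementing n while the slice seq[len-u*(n+1):len-u*n] equals unit.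
-- The fuel argument only makes the recursion total: started at n = 0 with fuel
-- L.length / U.length + 1 it never runs out before the slice test fails (proved below).
-- A's try/except IndexError is dead code (Python slicing never raises) and is not ported.
def pvALoop (L U : List Char) (fuel n : Nat) : Nat :=
  match fuel with
  | 0 => n
  | fuel + 1 =>
    if PySem.List.slice L (some ((L.length : Int) - (U.length : Int) * ((n : Int) + 1)))
        (some ((L.length : Int) - (U.length : Int) * (n : Int))) = U then
      pvALoop L U fuel (n + 1)
    else n

def count_seq_tail_repeats_py (seq : String) (unit : String) : Int :=
  let L := seq.toList
  let U := unit.toList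
  if U.length > 0 then (pvALoop L U (L.length / U.length + 1) 0 : Int) else 0

-- ===== PORT B =====
-- B's while loop: increment m while m < len(seq) and seq[n-1-m] == unit[u-1-m%u]; both
-- indices are in range whenever the first conjunct holds, so pyGet? equality on Options
-- is exact. The fuel argument (started at L.length) only makes the recursion total: the
-- loop guard m < L.length stops it before fuel runs out (proved below). m and u are
-- non-negative, so Python's m % u is Nat mod and m // u is PySem.Int.floordiv of casts.
def pvScan (L U : List Char) (fuel m : Nat) : Nat :=
  match fuel with
  | 0 => m
  | fuel + 1 =>
    if m < L.length ∧
        PySem.List.pyGet? L ((L.length : Int) - 1 - (m : Int)) =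
          PySem.List.pyGet? U ((U.length : Int) - 1 - ((m % U.length : Nat) : Int)) then
      pvScan L U fuel (m + 1)
    else m

def count_seq_tail_repeats_py_alt (seq : String) (unit : String) : Int :=
  let L := seq.toList
  let U := unit.toList
  if U.length = 0 then 0
  else PySem.Int.floordiv ((pvScan L U L.length 0 : Nat) : Int) ((U.length : Nat) : Int)

-- ===== PRECONDITION & SPEC =====
def Spec_count_seq_tail_repeats_py (seq : String) (unit : String) (out : Int) : Prop := out = count_seq_tail_repeats_py_alt seq unit
instance (seq : String) (unit : String) (out : Int) : Decidable (Spec_count_seq_tail_repeats_py seq unit out) := by unfold Spec_count_seq_tail_repeats_py; infer_instance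

-- ===== CLAIM (what is proved, stated in full; the proofs are below) =====
def Claim_equal_count_seq_tail_repeats_py : Prop := ∀ (seq : String) (unit : String), Dom_count_seq_tail_repeats_py seq unit → Spec_count_seq_tail_repeats_py seq unit (count_seq_tail_repeats_py seq unit)

-- ===== LEMMAS AND PROOFS =====

-- unit repeated n times
def pvRep (U : List Char) (n : Nat) : List Char := (List.replicate n U).flatten

-- "L ends in n copies of U"
def pvTail (L U : List Char) (n : Nat) : Bool :=
  L.drop (L.length - U.length * n) == pvRep U n

-- B's loop condition at position j, as a Bool
def pvC (L U : List Char) (j : Nat) : Bool :=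
  decide (j < L.length) &&
    (PySem.List.pyGet? L ((L.length : Int) - 1 - (j : Int)) ==
      PySem.List.pyGet? U ((U.length : Int) - 1 - ((j % U.length : Nat) : Int)))

theorem pvRep_succ (U : List Char) (n : Nat) : pvRep U (n + 1) = U ++ pvRep U n := by
  simp [pvRep, List.replicate_succ]

theorem pvRep_length (U : List Char) (n : Nat) : (pvRep U n).length = n * U.length := by
  induction n with
  | zero => simp [pvRep]
  | succ n ih => rw [pvRep_succ]; simp [ih, Nat.succ_mul]; omega

theorem pvTail_zero (L U : List Char) : pvTail L U 0 = true := by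
  simp [pvTail, pvRep]

theorem pvTail_le {L U : List Char} {n : Nat} (h : pvTail L U n = true) :
    U.length * n ≤ L.length := by
  have h' : L.drop (L.length - U.length * n) = pvRep U n := by
    simpa [pvTail] using h
  have := congrArg List.length h'
  rw [List.length_drop, pvRep_length, Nat.mul_comm n U.length] at this
  omega

theorem pvTail_down {L U : List Char} {n : Nat} (h : pvTail L U (n + 1) = true) :
    pvTail L U n = true := by
  have hle := pvTail_le h
  have h' : L.drop (L.length - U.length * (n + 1)) = pvRep U (n + 1) := by
    simpa [pvTail] using h
  have harith : L.length - U.length * n = (L.length - U.length * (n + 1)) + U.length := by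
    have : U.length * (n + 1) = U.length * n + U.length := by ring
    omega
  have : L.drop (L.length - U.length * n) = pvRep U n := by
    rw [harith, ← List.drop_drop, h', pvRep_succ, List.drop_left]
  simpa [pvTail] using this

theorem pvTail_mono {L U : List Char} {k m : Nat} (hkm : k ≤ m)
    (h : pvTail L U m = true) : pvTail L U k = true := by
  induction m with
  | zero => simpa [Nat.le_zero.mp hkm] using h
  | succ m ih =>
    rcases Nat.eq_or_lt_of_le hkm with rfl | hlt
    · exact h
    · exact ih (Nat.lt_succ_iff.mp hlt) (pvTail_down h)

-- ===== A-side: the loop computes the greatest k ≤ len/u with pvTail =====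

theorem pvCond_iff {L U : List Char} {n : Nat} (hu : 0 < U.length)
    (h : pvTail L U n = true) :
    (PySem.List.slice L (some ((L.length : Int) - (U.length : Int) * ((n : Int) + 1)))
        (some ((L.length : Int) - (U.length : Int) * (n : Int))) = U)
      ↔ pvTail L U (n + 1) = true := by
  have hun := pvTail_le h
  have hc1 : (U.length : Int) * ((n : Int) + 1) = ((U.length * (n + 1) : Nat) : Int) := by
    push_cast; ring
  have hc2 : (U.length : Int) * (n : Int) = ((U.length * n : Nat) : Int) := by
    push_cast; ring
  by_cases hle : U.length * (n + 1) ≤ L.length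
  · have ha : (L.length : Int) - (U.length : Int) * ((n : Int) + 1)
        = ((L.length - U.length * (n + 1) : Nat) : Int) := by rw [hc1]; omega
    have hb : (L.length : Int) - (U.length : Int) * (n : Int)
        = ((L.length - U.length * n : Nat) : Int) := by rw [hc2]; omega
    rw [ha, hb, PySem.List.slice_natCast]
    have htake : L.length - U.length * n - (L.length - U.length * (n + 1)) = U.length := by
      have : U.length * (n + 1) = U.length * n + U.length := by ring
      omega
    rw [htake]
    have h' : L.drop (L.length - U.length * n) = pvRep U n := by simpa [pvTail] using h
    have hdecomp : L.drop (L.length - U.length * (n + 1))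
        = (L.drop (L.length - U.length * (n + 1))).take U.length ++ pvRep U n := by
      conv_lhs => rw [← List.take_append_drop U.length (L.drop (L.length - U.length * (n + 1)))]
      rw [List.drop_drop,
        show L.length - U.length * (n + 1) + U.length = L.length - U.length * n by
          have : U.length * (n + 1) = U.length * n + U.length := by ring
          omega, h']
    constructor
    · intro hs
      have hfull : L.drop (L.length - U.length * (n + 1)) = U ++ pvRep U n := by
        rw [hdecomp, hs]
      simp [pvTail, pvRep_succ, hfull]
    · intro ht
      have ht' : L.drop (L.length - U.length * (n + 1)) = U ++ pvRep U n := by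
        simpa [pvTail, pvRep_succ] using ht
      rw [ht', List.take_left]
  · constructor
    · intro hs
      exfalso
      have hlt : L.length < U.length * (n + 1) := Nat.lt_of_not_le hle
      have hlen := congrArg List.length hs
      rw [PySem.List.length_slice] at hlen
      have hb : (L.length : Int) - (U.length : Int) * (n : Int)
          = ((L.length - U.length * n : Nat) : Int) := by rw [hc2]; omega
      rw [hb, PySem.List.clampIdx_natCast] at hlen
      have hge : U.length ≤ min (L.length - U.length * n) L.length :=
        hlen.symm.le.trans (Nat.sub_le _ _)
      have hsum : U.length * (n + 1) = U.length * n + U.length := by ring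
      omega
    · intro hx
      exact absurd (pvTail_le hx) hle

theorem pvALoop_eq {L U : List Char} (hu : 0 < U.length) :
    ∀ (fuel n : Nat), pvTail L U n = true → L.length / U.length + 1 - n ≤ fuel →
      pvALoop L U fuel n
        = Nat.findGreatest (fun m => pvTail L U m = true) (L.length / U.length) := by
  intro fuel
  induction fuel with
  | zero =>
    intro n h hf
    exfalso
    have h1 := pvTail_le h
    have h2 : n ≤ L.length / U.length :=
      (Nat.le_div_iff_mul_le hu).mpr (by rw [Nat.mul_comm]; exact h1)
    omega
  | succ fuel ih =>
    intro n h hf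
    rw [pvALoop]
    split_ifs with hc
    · exact ih (n + 1) ((pvCond_iff hu h).mp hc) (by omega)
    · have hnot : pvTail L U (n + 1) ≠ true := fun hx => hc ((pvCond_iff hu h).mpr hx)
      symm
      rw [Nat.findGreatest_eq_iff]
      refine ⟨(Nat.le_div_iff_mul_le hu).mpr (by rw [Nat.mul_comm]; exact pvTail_le h),
        fun _ => h, ?_⟩
      intro m hlt _ hm
      exact hnot (pvTail_mono (Nat.succ_le_of_lt hlt) hm)

-- ===== B-side: the scan length, divided by u, is that same greatest k =====

-- indexing a repeated unit from the front is cyclic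
theorem pvRep_getElem? (U : List Char) (k i : Nat) (hi : i < k * U.length) :
    (pvRep U k)[i]? = U[i % U.length]? := by
  induction k generalizing i with
  | zero => omega
  | succ k ih =>
    rw [pvRep_succ]
    by_cases hlt : i < U.length
    · rw [List.getElem?_append_left hlt, Nat.mod_eq_of_lt hlt]
    · have hge : U.length ≤ i := Nat.le_of_not_lt hlt
      rw [List.getElem?_append_right hge]
      have hi' : i - U.length < k * U.length := by
        have : (k + 1) * U.length = k * U.length + U.length := by ring
        omega
      rw [ih _ hi']
      congr 1
      conv_rhs => rw [show i = (i - U.length) + U.length from by omega]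
      rw [Nat.add_mod_right]

-- reversing an index inside u*k flips the residue
theorem pvModRev (u k i : Nat) (hu : 0 < u) (hi : i < u * k) :
    (u * k - 1 - i) % u = u - 1 - i % u := by
  obtain ⟨q, r, hr, hiqr⟩ : ∃ q r, r < u ∧ i = u * q + r :=
    ⟨i / u, i % u, Nat.mod_lt _ hu, (Nat.div_add_mod i u).symm⟩
  have hmod : i % u = r := by rw [hiqr, Nat.mul_add_mod, Nat.mod_eq_of_lt hr]
  have hqk : q < k := Nat.lt_of_mul_lt_mul_left (a := u) (by omega)
  obtain ⟨d, hd⟩ : ∃ d, k = q + 1 + d := ⟨k - (q + 1), by omega⟩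
  have he : u * k = u * q + u * d + u := by rw [hd]; ring
  have h2 : u * k - 1 - i = u * d + (u - 1 - r) := by omega
  rw [hmod, h2, Nat.mul_add_mod, Nat.mod_eq_of_lt (by omega)]

-- B's condition at an in-range position, with the casts removed
theorem pvC_iff {L U : List Char} {j : Nat} (hu : 0 < U.length) (hj : j < L.length) :
    pvC L U j = true ↔
      L[L.length - 1 - j]? = U[U.length - 1 - j % U.length]? := by
  have e1 : (L.length : Int) - 1 - (j : Int) = ((L.length - 1 - j : Nat) : Int) := by omega
  have e2 : (U.length : Int) - 1 - ((j % U.length : Nat) : Int)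
      = ((U.length - 1 - j % U.length : Nat) : Int) := by
    have := Nat.mod_lt j hu
    omega
  simp only [pvC, e1, e2, PySem.List.pyGet?_natCast, Bool.and_eq_true, decide_eq_true_eq,
    beq_iff_eq]
  exact ⟨fun h => h.2, fun h => ⟨hj, h⟩⟩

-- the bridge: "L ends in k units" ↔ "the last u*k characters match unit cyclically"
theorem pvBridge {L U : List Char} (hu : 0 < U.length) (k : Nat)
    (hk : U.length * k ≤ L.length) :
    pvTail L U k = true ↔ ∀ j < U.length * k, pvC L U j = true := by
  have hdrop : ∀ i : Nat, (L.drop (L.length - U.length * k))[i]? = L[L.length - U.length * k + i]? :=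
    fun i => List.getElem?_drop ..
  constructor
  · intro h j hj
    have h' : L.drop (L.length - U.length * k) = pvRep U k := by simpa [pvTail] using h
    have hj' : j < L.length := by omega
    rw [pvC_iff hu hj']
    have i_lt : U.length * k - 1 - j < k * U.length := by
      have : k * U.length = U.length * k := Nat.mul_comm ..
      omega
    have hthis := hdrop (U.length * k - 1 - j)
    rw [h', pvRep_getElem? U k _ i_lt] at hthis
    rw [show L.length - 1 - j = L.length - U.length * k + (U.length * k - 1 - j) from by omega,
      ← hthis, pvModRev U.length k j hu hj]
  · intro h
    have hlen : (L.drop (L.length - U.length * k)).length = (pvRep U k).length := by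
      rw [List.length_drop, pvRep_length, Nat.mul_comm k U.length]; omega
    have : L.drop (L.length - U.length * k) = pvRep U k := by
      apply List.ext_getElem?
      intro i
      by_cases hi : i < U.length * k
      · rw [hdrop, pvRep_getElem? U k i (by rw [Nat.mul_comm k U.length]; exact hi)]
        have hji : U.length * k - 1 - i < U.length * k := by omega
        have hc := (pvC_iff hu (by omega : U.length * k - 1 - i < L.length)).mp (h _ hji)
        rw [show L.length - 1 - (U.length * k - 1 - i) = L.length - U.length * k + i from by
              omega] at hc
        have h3 := pvModRev U.length k (U.length * k - 1 - i) hu hji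
        rw [show U.length * k - 1 - (U.length * k - 1 - i) = i from by omega] at h3
        rw [hc, ← h3]
      · rw [List.getElem?_eq_none (by rw [List.length_drop]; omega),
            List.getElem?_eq_none (by rw [pvRep_length, Nat.mul_comm k U.length]; omega)]
    simpa [pvTail] using this

-- the scan returns the first position whose condition fails
theorem pvScan_eq {L U : List Char} {M : Nat} (hM : pvC L U M = false)
    (hall : ∀ j < M, pvC L U j = true) :
    ∀ (fuel m : Nat), m ≤ M → M - m ≤ fuel → pvScan L U fuel m = M := by
  intro fuel
  induction fuel with
  | zero => intro m hm hf; rw [pvScan]; omega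
  | succ fuel ih =>
    intro m hm hf
    rw [pvScan]
    rcases Nat.eq_or_lt_of_le hm with rfl | hlt
    · rw [if_neg]
      intro hc
      have : pvC L U m = true := by
        simp only [pvC, Bool.and_eq_true, decide_eq_true_eq, beq_iff_eq]
        exact hc
      rw [hM] at this; exact Bool.false_ne_true this
    · rw [if_pos, ]
      · exact ih (m + 1) hlt (by omega)
      · have := hall m hlt
        simp only [pvC, Bool.and_eq_true, decide_eq_true_eq, beq_iff_eq] at this
        exact this

-- the scan stops no later than L.length
theorem pvC_len (L U : List Char) : pvC L U L.length = false := by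
  simp [pvC]

-- ===== VERDICT (by name: the statement is the Claim_ definition above) =====
theorem count_seq_tail_repeats_py_spec : Claim_equal_count_seq_tail_repeats_py := by
  intro seq unit _
  unfold Spec_count_seq_tail_repeats_py count_seq_tail_repeats_py count_seq_tail_repeats_py_alt
  by_cases hu : unit.toList.length = 0
  · simp [hu]
  · have hu' : 0 < unit.toList.length := Nat.pos_of_ne_zero hu
    set L := seq.toList
    set U := unit.toList
    simp only [hu, if_false, hu', if_pos]
    -- M := the least failing position of B's scan
    have hex : ∃ j, pvC L U j = false := ⟨L.length, pvC_len L U⟩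
    set M := Nat.find hex with hMdef
    have hMfail : pvC L U M = false := Nat.find_spec hex
    have hMall : ∀ j < M, pvC L U j = true := by
      intro j hj
      have := Nat.find_min hex hj
      simpa using this
    have hMlen : M ≤ L.length := Nat.find_min' hex (pvC_len L U)
    rw [pvScan_eq hMfail hMall L.length 0 (Nat.zero_le _) (by omega)]
    -- B's value is M / u; show A's loop lands there too
    have hdiv : U.length * (M / U.length) ≤ M := by
      rw [Nat.mul_comm]; exact Nat.div_mul_le_self M U.length
    have hT : pvTail L U (M / U.length) = true := by
      rw [pvBridge hu' _ (by omega)]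
      intro j hj
      exact hMall j (by omega)
    have hnotT : pvTail L U (M / U.length + 1) ≠ true := by
      intro hx
      have hle := pvTail_le hx
      have hall := (pvBridge hu' _ hle).mp hx
      have hMlt : M < U.length * (M / U.length + 1) := by
        rw [Nat.mul_comm]
        exact (Nat.div_lt_iff_lt_mul hu').mp (Nat.lt_succ_self _)
      have := hall M hMlt
      rw [hMfail] at this; exact Bool.false_ne_true this
    have hfind : Nat.findGreatest (fun m => pvTail L U m = true) (L.length / U.length)
        = M / U.length := by
      rw [Nat.findGreatest_eq_iff]
      refine ⟨Nat.div_le_div_right hMlen, fun _ => hT, ?_⟩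
      intro m hlt _ hm
      exact hnotT (pvTail_mono (Nat.succ_le_of_lt hlt) hm)
    rw [pvALoop_eq hu' (L.length / U.length + 1) 0 (pvTail_zero _ _) (by simp), hfind]
    simp [PySem.Int.floordiv_natCast]
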